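-- pv_equiv track=rewrite | github.com/Batyrkhan314/pp2 | TSIS3/Functions1/functions1_8.py | agent_007
-- ===== SOURCE A (Python) =====
-- def agent_007(arr):
--     n = len(arr)
--
--     for i in range(n):
--         if arr[i] == 0:
--             for j in range(i+1,n):
--                 if arr[j]==0:
--                     for k in range(j+1,n):
--                         if arr[k] == 7:
--                             return True
--
--     return False
-- ===== SOURCE B (Python) =====
-- def agent_007(arr):
--     state = 0
--     for x in arr:
--         if state == 0:
--             if x == 0:
--                 state = 1
--         elif state == 1:
--             if x == 0:
--                 state = 2
--         else:
--             if x == 7: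
--                 return True
--     return False
-- ===== Notes on version B (the rewrite author's own statement) =====
-- stated objective: alternative
-- what changed: Replaced the triple nested index loop with a single-pass three-state machine (seen zero zeros / one zero / two zeros, then look for 7); worst-case O(n) vs A's O(n^3), though not measurably faster on the random timing inputs.
import Mathlib
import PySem

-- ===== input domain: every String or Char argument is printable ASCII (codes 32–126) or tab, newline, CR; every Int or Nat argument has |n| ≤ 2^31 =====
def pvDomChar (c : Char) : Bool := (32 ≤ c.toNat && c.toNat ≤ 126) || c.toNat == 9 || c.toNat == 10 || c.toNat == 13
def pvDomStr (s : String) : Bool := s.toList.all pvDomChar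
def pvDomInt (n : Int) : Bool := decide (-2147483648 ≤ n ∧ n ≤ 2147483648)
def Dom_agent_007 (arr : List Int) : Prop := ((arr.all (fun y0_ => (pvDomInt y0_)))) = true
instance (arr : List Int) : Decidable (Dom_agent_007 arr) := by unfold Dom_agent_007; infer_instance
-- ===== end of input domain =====

-- B replaces A's triple nested index loop by a single-pass three-state machine (alternative single-pass formulation).

-- ===== PORT A =====
-- A's loops over index ranges i, i+1..n, j+1..n are transcribed as recursions over the
-- corresponding list suffixes: loopK = the k-loop (scan for 7), loopJ = the j-loop
-- (on a 0, run the k-loop on the rest, else keep scanning), loopI likewise for i.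
def pvLoopK : List Int → Bool
  | [] => false
  | x :: xs => if x = 7 then true else pvLoopK xs

def pvLoopJ : List Int → Bool
  | [] => false
  | x :: xs => if x = 0 then (if pvLoopK xs then true else pvLoopJ xs) else pvLoopJ xs

def pvLoopI : List Int → Bool
  | [] => false
  | x :: xs => if x = 0 then (if pvLoopJ xs then true else pvLoopI xs) else pvLoopI xs

def agent_007 (arr : List Int) : Bool := pvLoopI arr

-- ===== PORT B =====
-- state 0: no zero seen; 1: one zero seen; 2: two zeros seen, looking for a 7.
def pvAltGo : Nat → List Int → Bool
  | _, [] => false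
  | 0, x :: xs => pvAltGo (if x = 0 then 1 else 0) xs
  | 1, x :: xs => pvAltGo (if x = 0 then 2 else 1) xs
  | _+2, x :: xs => if x = 7 then true else pvAltGo 2 xs

def agent_007_alt (arr : List Int) : Bool := pvAltGo 0 arr

-- ===== PRECONDITION & SPEC =====
def Spec_agent_007 (arr : List Int) (out : Bool) : Prop := out = agent_007_alt arr
instance (arr : List Int) (out : Bool) : Decidable (Spec_agent_007 arr out) := by unfold Spec_agent_007; infer_instance

-- ===== CLAIM (what is proved, stated in full; the proofs are below) =====
def Claim_equal_agent_007 : Prop := ∀ (arr : List Int), Dom_agent_007 arr → Spec_agent_007 arr (agent_007 arr)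

-- ===== LEMMAS AND PROOFS =====
-- monotonicity: if a 0-then-7 remains to be found, a 7 alone remains to be found
theorem pv_mono21 (xs : List Int) (h : pvAltGo 1 xs = true) : pvAltGo 2 xs = true := by
  induction xs with
  | nil => simpa [pvAltGo] using h
  | cons x xs ih =>
    simp only [pvAltGo] at h ⊢
    by_cases hx : x = 0
    · simp [hx] at h; simp [h]
    · by_cases h7 : x = 7
      · simp [h7]
      · simp [hx] at h; simp [h7, ih h]

theorem pv_mono10 (xs : List Int) (h : pvAltGo 0 xs = true) : pvAltGo 1 xs = true := by
  induction xs with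
  | nil => simpa [pvAltGo] using h
  | cons x xs ih =>
    simp only [pvAltGo] at h ⊢
    by_cases hx : x = 0
    · simp [hx] at h ⊢; exact pv_mono21 xs h
    · simp [hx] at h ⊢; exact ih h

theorem pv_loopK_eq (xs : List Int) : pvLoopK xs = pvAltGo 2 xs := by
  induction xs with
  | nil => rfl
  | cons x xs ih => simp only [pvLoopK, pvAltGo, ih]

theorem pv_loopJ_eq (xs : List Int) : pvLoopJ xs = pvAltGo 1 xs := by
  induction xs with
  | nil => rfl
  | cons x xs ih =>
    simp only [pvLoopJ, pvAltGo, pv_loopK_eq, ih]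
    by_cases hx : x = 0
    · simp only [hx, if_pos rfl]
      cases h2 : pvAltGo 2 xs with
      | true => simp [h2]
      | false =>
        have h1 : pvAltGo 1 xs = false := by
          cases h1 : pvAltGo 1 xs with
          | false => rfl
          | true => exact absurd (pv_mono21 xs h1) (by simp [h2])
        simp [h1, h2]
    · simp [hx]

theorem pv_loopI_eq (xs : List Int) : pvLoopI xs = pvAltGo 0 xs := by
  induction xs with
  | nil => rfl
  | cons x xs ih =>
    simp only [pvLoopI, pvAltGo, pv_loopJ_eq, ih]
    by_cases hx : x = 0
    · simp only [hx, if_pos rfl]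
      cases h1 : pvAltGo 1 xs with
      | true => simp [h1]
      | false =>
        have h0 : pvAltGo 0 xs = false := by
          cases h0 : pvAltGo 0 xs with
          | false => rfl
          | true => exact absurd (pv_mono10 xs h0) (by simp [h1])
        simp [h0, h1]
    · simp [hx]

-- ===== VERDICT (by name: the statement is the Claim_ definition above) =====
theorem agent_007_spec : Claim_equal_agent_007 := by
  intro arr _
  unfold Spec_agent_007 agent_007 agent_007_alt
  exact pv_loopI_eq arr
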